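-- pv_equiv track=rewrite | github.com/sandialabs/conin | clio/common_constraints.py | appears_at_least_once_after
-- ===== SOURCE A (Python) =====
-- def appears_at_least_once_after(seq, val1, val2):
--     """
--     Requires at least one instance of val1 to appear after first val2
--
--     Parameters:
--         seq (iterable): The sequence to be checked.
--         val1: val1 appears after val2
--         val2: val2 appears before val1
--
--     Returns:
--         bool: True iff satisfied
--     """
--     for index1, x1 in enumerate(seq):
--         if x1 == val2:
--             for index2 in range(index1 + 1, len(seq)):
--                 if seq[index2] == val1:
--                     return True
--             return False
--     return True
-- ===== SOURCE B (Python) =====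
-- def appears_at_least_once_after(seq, val1, val2):
--     """Single forward pass with a seen-val2 flag instead of index-and-rescan."""
--     seen_val2 = False
--     for x in seq:
--         if seen_val2 and x == val1:
--             return True
--         if x == val2:
--             seen_val2 = True
--     return not seen_val2
-- ===== Notes on version B (the rewrite author's own statement) =====
-- stated objective: simpler
-- what changed: Replaced the find-first-index-then-rescan-the-tail-by-indexing structure with one forward pass maintaining a seen_val2 flag; no indexing and no second scan.
import Mathlib
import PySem

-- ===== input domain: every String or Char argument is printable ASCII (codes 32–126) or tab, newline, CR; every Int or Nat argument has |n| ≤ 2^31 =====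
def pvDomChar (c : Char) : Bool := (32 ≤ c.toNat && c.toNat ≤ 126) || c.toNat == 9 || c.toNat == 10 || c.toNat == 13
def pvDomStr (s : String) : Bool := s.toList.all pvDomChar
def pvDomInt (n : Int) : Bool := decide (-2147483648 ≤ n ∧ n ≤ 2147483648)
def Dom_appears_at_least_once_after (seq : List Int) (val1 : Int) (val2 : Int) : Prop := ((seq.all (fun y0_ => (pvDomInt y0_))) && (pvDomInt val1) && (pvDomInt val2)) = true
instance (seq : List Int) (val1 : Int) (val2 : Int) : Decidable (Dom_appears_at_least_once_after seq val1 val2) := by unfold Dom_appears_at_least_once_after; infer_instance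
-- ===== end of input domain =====

-- B replaces A's find-first-val2-index-then-rescan-the-tail-by-index with one forward pass
-- keeping a seen_val2 flag (objective: simpler; return values proved equal on all inputs).

-- ===== PORT A =====
-- inner loop: for index2 in range(index1+1, len(seq)): if seq[index2] == val1: return True; (fallthrough) return False
def pvAInner (seq : List Int) (val1 : Int) : List Int → Bool
  | [] => false
  | i :: rest => if PySem.List.pyGet? seq i = some val1 then true else pvAInner seq val1 rest

-- outer loop: for index1, x1 in enumerate(seq): …  (i is the running enumerate index, rest the remaining elements)
def pvAOuter (seq : List Int) (val1 val2 : Int) (i : Int) : List Int → Bool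
  | [] => true
  | x1 :: rest =>
      if x1 == val2 then pvAInner seq val1 (PySem.List.pyRange (i + 1) seq.length 1)
      else pvAOuter seq val1 val2 (i + 1) rest

def appears_at_least_once_after (seq : List Int) (val1 : Int) (val2 : Int) : Bool :=
  pvAOuter seq val1 val2 0 seq

-- ===== PORT B =====
def pvBLoop (val1 val2 : Int) (seen : Bool) : List Int → Bool
  | [] => !seen
  | x :: rest => if seen && x == val1 then true else pvBLoop val1 val2 (seen || x == val2) rest

def appears_at_least_once_after_alt (seq : List Int) (val1 : Int) (val2 : Int) : Bool :=
  pvBLoop val1 val2 false seq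

-- ===== PRECONDITION & SPEC =====
def Spec_appears_at_least_once_after (seq : List Int) (val1 : Int) (val2 : Int) (out : Bool) : Prop := out = appears_at_least_once_after_alt seq val1 val2
instance (seq : List Int) (val1 : Int) (val2 : Int) (out : Bool) : Decidable (Spec_appears_at_least_once_after seq val1 val2 out) := by unfold Spec_appears_at_least_once_after; infer_instance

-- ===== CLAIM (what is proved, stated in full; the proofs are below) =====
def Claim_equal_appears_at_least_once_after : Prop := ∀ (seq : List Int) (val1 : Int) (val2 : Int), Dom_appears_at_least_once_after seq val1 val2 → Spec_appears_at_least_once_after seq val1 val2 (appears_at_least_once_after seq val1 val2)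

-- ===== LEMMAS AND PROOFS =====

-- A's inner index scan over range(i, len seq) equals an any-scan of the dropped tail.
theorem pvAInner_range (seq : List Int) (val1 : Int) (i : Nat) :
    pvAInner seq val1 (PySem.List.pyRange (i : Int) seq.length 1) = (seq.drop i).any (· == val1) := by
  by_cases h : i < seq.length
  · rw [PySem.List.pyRange_one_cons (by exact_mod_cast h)]
    have hdrop : seq.drop i = seq[i] :: seq.drop (i + 1) := List.drop_eq_getElem_cons h
    rw [pvAInner, PySem.List.pyGet?_natCast, List.getElem?_eq_getElem h]
    by_cases hv : seq[i] = val1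
    · simp [hv, hdrop]
    · rw [if_neg (by simpa using hv), hdrop, List.any_cons]
      have := pvAInner_range seq val1 (i + 1)
      push_cast at this
      simp [this, hv]
  · rw [PySem.List.pyRange_one_eq_nil (by exact_mod_cast Nat.le_of_not_lt h)]
    simp [pvAInner, List.drop_eq_nil_of_le (Nat.le_of_not_lt h)]

-- B's loop with the flag already set equals the same any-scan.
theorem pvBLoop_seen (val1 val2 : Int) (xs : List Int) :
    pvBLoop val1 val2 true xs = xs.any (· == val1) := by
  induction xs with
  | nil => simp [pvBLoop]
  | cons x rest ih => by_cases h : x == val1 <;> simp [pvBLoop, h, ih]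

-- Main invariant: with rest = seq.drop i, A's outer loop agrees with B's flag-off loop.
theorem pvOuter_eq (seq : List Int) (val1 val2 : Int) (i : Nat) (rest : List Int)
    (h : rest = seq.drop i) :
    pvAOuter seq val1 val2 (i : Int) rest = pvBLoop val1 val2 false rest := by
  induction rest generalizing i with
  | nil => simp [pvAOuter, pvBLoop]
  | cons x xs ih =>
    have hdrop : xs = seq.drop (i + 1) := by
      have := congrArg (List.drop 1) h
      simpa [List.drop_drop, Nat.add_comm] using this
    have hc : ((i : Int) + 1) = ((i + 1 : Nat) : Int) := by push_cast; ring
    by_cases hv : x == val2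
    · rw [pvAOuter, pvBLoop, if_pos hv, if_neg (by simp)]
      simp only [hv, Bool.false_or]
      rw [hc, pvAInner_range, pvBLoop_seen, hdrop]
    · rw [pvAOuter, pvBLoop, if_neg hv, if_neg (by simp)]
      simp only [Bool.false_or, hv]
      rw [hc]
      exact ih (i + 1) hdrop

-- ===== VERDICT (by name: the statement is the Claim_ definition above) =====
theorem appears_at_least_once_after_spec : Claim_equal_appears_at_least_once_after := by
  intro seq val1 val2 _
  unfold Spec_appears_at_least_once_after appears_at_least_once_after appears_at_least_once_after_alt
  exact pvOuter_eq seq val1 val2 0 seq (by simp)
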